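-- pv_equiv track=rewrite | github.com/amireskandariii/retarget | my-skeleton-network/model/skeleton_operators.py | pool_seq
-- ===== SOURCE A (Python) =====
-- def pool_seq(degree):
--     num_joint = len(degree)
--     seq_list = [[]]
--     for joint_idx in range(1, num_joint):
--         if degree[joint_idx] == 2:
--             seq_list[-1].append(joint_idx)
--         else:
--             seq_list[-1].append(joint_idx)
--             seq_list.append([])
--             continue
--     seq_list = [each for each in seq_list if len(each) != 0]
--     return seq_list
-- ===== SOURCE B (Python) =====
-- def pool_seq(degree):
--     n = len(degree)
--     breaks = [i for i in range(1, n) if degree[i] != 2]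
--     res = []
--     start = 1
--     for b in breaks:
--         res.append(list(range(start, b + 1)))
--         start = b + 1
--     if start < n:
--         res.append(list(range(start, n)))
--     return res
-- ===== Notes on version B (the rewrite author's own statement) =====
-- stated objective: alternative
-- what changed: B precomputes the breakpoint indices (degree != 2) and materialises each segment as a range slice between consecutive breakpoints, instead of A's single scan that appends into a growing last list and flushes on each break.
import Mathlib
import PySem

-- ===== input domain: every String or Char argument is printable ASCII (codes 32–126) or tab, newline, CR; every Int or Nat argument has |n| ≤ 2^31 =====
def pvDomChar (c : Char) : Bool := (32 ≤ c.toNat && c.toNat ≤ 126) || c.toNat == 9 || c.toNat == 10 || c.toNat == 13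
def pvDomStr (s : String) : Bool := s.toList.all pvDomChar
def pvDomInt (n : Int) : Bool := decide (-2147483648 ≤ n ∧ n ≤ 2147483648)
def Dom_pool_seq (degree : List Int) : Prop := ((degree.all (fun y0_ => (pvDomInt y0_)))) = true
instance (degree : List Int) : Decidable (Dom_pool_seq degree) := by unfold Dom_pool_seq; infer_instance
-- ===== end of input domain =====

-- B groups 1..n-1 by slicing ranges between precomputed breakpoints (degree != 2)
-- instead of A's accumulate-into-last-list-and-flush scan; same cost, different decomposition.

-- ===== PORT A =====
-- one loop step of A: append joint_idx to seq_list[-1]; if degree[joint_idx] != 2, also push []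
def pool_seq_step (degree : List Int) (st : List (List Int)) (j : Int) : List (List Int) :=
  let st' := st.dropLast ++ [st.getLastD [] ++ [j]]
  if PySem.List.pyGet? degree j = some 2 then st' else st' ++ [[]]

def pool_seq (degree : List Int) : List (List Int) :=
  let num_joint : Int := degree.length
  let seq_list : List (List Int) := [[]]
  let seq_list := (PySem.List.pyRange 1 num_joint 1).foldl (pool_seq_step degree) seq_list
  seq_list.filter (fun each => decide (each.length ≠ 0))

-- ===== PORT B =====
def pool_seq_alt (degree : List Int) : List (List Int) :=
  let n : Int := degree.length
  let breaks := (PySem.List.pyRange 1 n 1).filter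
    (fun i => decide (PySem.List.pyGet? degree i ≠ some 2))
  let p := breaks.foldl
    (fun st b => (b + 1, st.2 ++ [PySem.List.pyRange st.1 (b + 1) 1]))
    ((1 : Int), ([] : List (List Int)))
  if p.1 < n then p.2 ++ [PySem.List.pyRange p.1 n 1] else p.2

-- ===== PRECONDITION & SPEC =====
def Spec_pool_seq (degree : List Int) (out : List (List Int)) : Prop := out = pool_seq_alt degree
instance (degree : List Int) (out : List (List Int)) : Decidable (Spec_pool_seq degree out) := by unfold Spec_pool_seq; infer_instance

-- ===== CLAIM (what is proved, stated in full; the proofs are below) =====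
def Claim_equal_pool_seq : Prop := ∀ (degree : List Int), Dom_pool_seq degree → Spec_pool_seq degree (pool_seq degree)

-- ===== LEMMAS AND PROOFS =====

-- common recursive characterisation: segments of s..n-1 with open segment cur, fuel k = (n-s).toNat
def segsFrom (degree : List Int) : Nat → Int → Int → List Int → List (List Int)
  | 0, _, _, cur => if cur = [] then [] else [cur]
  | k + 1, s, n, cur =>
    if s < n then
      if PySem.List.pyGet? degree s = some 2 then segsFrom degree k (s + 1) n (cur ++ [s])
      else (cur ++ [s]) :: segsFrom degree k (s + 1) n []
    else if cur = [] then [] else [cur]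

theorem pool_seq_eq_segs (degree : List Int) :
    ∀ (k : Nat) (s n : Int) (acc : List (List Int)) (cur : List Int),
      s ≤ n → (n - s).toNat = k →
      ((PySem.List.pyRange s n 1).foldl (pool_seq_step degree) (acc ++ [cur])).filter
          (fun each => decide (each.length ≠ 0))
        = acc.filter (fun each => decide (each.length ≠ 0)) ++ segsFrom degree k s n cur := by
  intro k
  induction k with
  | zero =>
    intro s n acc cur hsn hk
    have hns : n ≤ s := by omega
    rw [PySem.List.pyRange_one_eq_nil hns]
    simp only [List.foldl_nil, List.filter_append, segsFrom]
    cases cur with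
    | nil => simp
    | cons a t => simp
  | succ k ih =>
    intro s n acc cur hsn hk
    have hlt : s < n := by omega
    rw [PySem.List.pyRange_one_cons hlt]
    simp only [List.foldl_cons, segsFrom, if_pos hlt]
    have hstep : pool_seq_step degree (acc ++ [cur]) s =
        if PySem.List.pyGet? degree s = some 2 then acc ++ [cur ++ [s]]
        else (acc ++ [cur ++ [s]]) ++ [[]] := by
      simp [pool_seq_step]
    by_cases h2 : PySem.List.pyGet? degree s = some 2
    · rw [hstep, if_pos h2, if_pos h2, ih (s + 1) n acc (cur ++ [s]) (by omega) (by omega)]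
    · rw [hstep, if_neg h2, if_neg h2,
        show (acc ++ [cur ++ [s]]) ++ [[]] = (acc ++ [cur ++ [s]]) ++ [([] : List Int)] from rfl,
        ih (s + 1) n (acc ++ [cur ++ [s]]) [] (by omega) (by omega)]
      simp [List.filter_append]

def bFinish (n : Int) (p : Int × List (List Int)) : List (List Int) :=
  if p.1 < n then p.2 ++ [PySem.List.pyRange p.1 n 1] else p.2

theorem pool_seq_alt_eq_segs (degree : List Int) :
    ∀ (k : Nat) (s n start : Int) (res : List (List Int)),
      0 ≤ start → start ≤ s → s ≤ n → (n - s).toNat = k →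
      bFinish n (((PySem.List.pyRange s n 1).filter
          (fun i => decide (PySem.List.pyGet? degree i ≠ some 2))).foldl
          (fun st b => (b + 1, st.2 ++ [PySem.List.pyRange st.1 (b + 1) 1])) (start, res))
        = res ++ segsFrom degree k s n (PySem.List.pyRange start s 1) := by
  intro k
  induction k with
  | zero =>
    intro s n start res h0 hss hsn hk
    have hns : s = n := by omega
    subst hns
    rw [PySem.List.pyRange_one_eq_nil (le_refl s)]
    simp only [List.filter_nil, List.foldl_nil, segsFrom, bFinish]
    by_cases hlt : start < s
    · rw [if_pos hlt, if_neg (by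
        have : start ∈ PySem.List.pyRange start s 1 := by
          rw [PySem.List.mem_pyRange_one]; omega
        intro h; rw [h] at this; simp at this)]
    · have hle : s ≤ start := by omega
      rw [if_neg hlt, if_pos (PySem.List.pyRange_one_eq_nil hle), List.append_nil]
  | succ k ih =>
    intro s n start res h0 hss hsn hk
    have hlt : s < n := by omega
    rw [PySem.List.pyRange_one_cons hlt]
    simp only [List.filter_cons, segsFrom, if_pos hlt, decide_eq_true_eq]
    have hsplit : PySem.List.pyRange start (s + 1) 1 = PySem.List.pyRange start s 1 ++ [s] := by
      rw [PySem.List.pyRange_one_append start s (s + 1) hss (by omega),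
        PySem.List.pyRange_one_singleton]
    by_cases h2 : PySem.List.pyGet? degree s = some 2
    · rw [if_pos h2, if_neg (by simp [h2]),
        ih (s + 1) n start res h0 (by omega) (by omega) (by omega), hsplit]
    · rw [if_neg h2, if_pos h2, List.foldl_cons,
        ih (s + 1) n (s + 1) (res ++ [PySem.List.pyRange start (s + 1) 1])
          (by omega) (le_refl _) (by omega) (by omega),
        PySem.List.pyRange_one_eq_nil (le_refl (s + 1)), hsplit]
      simp

-- ===== VERDICT (by name: the statement is the Claim_ definition above) =====
theorem pool_seq_spec : Claim_equal_pool_seq := by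
  intro degree _
  unfold Spec_pool_seq
  have hAdef : pool_seq degree =
      ((PySem.List.pyRange 1 (degree.length : Int) 1).foldl (pool_seq_step degree)
        ([] ++ [[]])).filter (fun each => decide (each.length ≠ 0)) := rfl
  have hBdef : pool_seq_alt degree =
      bFinish (degree.length : Int)
        (((PySem.List.pyRange 1 (degree.length : Int) 1).filter
            (fun i => decide (PySem.List.pyGet? degree i ≠ some 2))).foldl
          (fun st b => (b + 1, st.2 ++ [PySem.List.pyRange st.1 (b + 1) 1]))
          ((1 : Int), ([] : List (List Int)))) := rfl
  by_cases hn : (1 : Int) ≤ (degree.length : Int)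
  · rw [hAdef, hBdef,
      pool_seq_eq_segs degree ((degree.length : Int) - 1).toNat 1 (degree.length : Int)
        [] [] hn (by omega),
      pool_seq_alt_eq_segs degree ((degree.length : Int) - 1).toNat 1 (degree.length : Int)
        1 [] (by omega) (le_refl _) hn (by omega),
      PySem.List.pyRange_one_eq_nil (le_refl (1 : Int))]
    simp
  · have hnil : degree = [] := by
      cases degree with
      | nil => rfl
      | cons a t => simp at hn
    subst hnil
    decide
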